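-- pv_equiv track=rewrite | github.com/yptb05/tb05 | app_儲存狀態顯示完整版.py | segments_to_html
-- ===== SOURCE A (Python) =====
-- COLOR_NAME_TO_HEX = {
--     "red": "C00000",
--     "blue": "1F4E79",
--     "green": "548235",
--     "orange": "C55A11",
--     "purple": "7030A0",
--     "gray": "666666",
--     "black": "000000",
-- }
--
-- def segments_to_html(segments) -> str:
--     html_parts = []
--     for txt, color in segments:
--         safe = (txt or "").replace("&", "&amp;").replace("<", "&lt;").replace(">", "&gt;").replace(" ", "&nbsp;").replace("\n", "<br>")
--         if color:
--             html_parts.append(f"<span style='color:#{COLOR_NAME_TO_HEX.get(color, '000000')}'>{safe}</span>")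
--         else:
--             html_parts.append(safe)
--     return "".join(html_parts)
-- ===== SOURCE B (Python) =====
-- COLOR_NAME_TO_HEX = {
--     "red": "C00000",
--     "blue": "1F4E79",
--     "green": "548235",
--     "orange": "C55A11",
--     "purple": "7030A0",
--     "gray": "666666",
--     "black": "000000",
-- }
--
-- ESCAPE = {"&": "&amp;", "<": "&lt;", ">": "&gt;", " ": "&nbsp;", "\n": "<br>"}
--
-- def segments_to_html(segments) -> str:
--     def render(txt, color):
--         safe = "".join(ESCAPE.get(c, c) for c in (txt or ""))
--         if color:
--             return f"<span style='color:#{COLOR_NAME_TO_HEX.get(color, '000000')}'>{safe}</span>"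
--         return safe
--     return "".join(render(txt, color) for txt, color in segments)
-- ===== Notes on version B (the rewrite author's own statement) =====
-- stated objective: alternative
-- what changed: B escapes each segment in a single character-by-character pass using an escape mapping (and renders via map+join) instead of A's five chained full-string .replace scans accumulated into a list.
import Mathlib
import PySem

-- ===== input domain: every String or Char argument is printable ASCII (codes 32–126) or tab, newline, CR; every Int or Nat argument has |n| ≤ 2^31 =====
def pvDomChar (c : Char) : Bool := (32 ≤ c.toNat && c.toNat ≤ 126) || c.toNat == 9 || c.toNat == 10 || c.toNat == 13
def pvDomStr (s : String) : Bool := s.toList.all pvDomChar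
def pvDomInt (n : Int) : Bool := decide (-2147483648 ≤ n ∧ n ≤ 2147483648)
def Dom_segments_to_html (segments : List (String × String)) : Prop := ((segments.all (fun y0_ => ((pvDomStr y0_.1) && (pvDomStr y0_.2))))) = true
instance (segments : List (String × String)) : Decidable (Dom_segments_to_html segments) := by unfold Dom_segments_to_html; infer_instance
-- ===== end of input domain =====

-- B escapes each segment in one character-by-character pass via an escape mapping (map + join)
-- instead of A's five chained .replace scans accumulated into a list; alternative, same cost.

-- ===== PORT A =====
def COLOR_NAME_TO_HEX : PySem.Dict String String :=
  PySem.Dict.ofList [("red", "C00000"), ("blue", "1F4E79"), ("green", "548235"),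
    ("orange", "C55A11"), ("purple", "7030A0"), ("gray", "666666"), ("black", "000000")]

def segments_to_html (segments : List (String × String)) : String :=
  let html_parts : List String := segments.foldl (fun html_parts p =>
    let txt := p.1
    let color := p.2
    let safe := PySem.Str.replace (PySem.Str.replace (PySem.Str.replace (PySem.Str.replace
      (PySem.Str.replace (if txt = "" then "" else txt) "&" "&amp;") "<" "&lt;") ">" "&gt;")
      " " "&nbsp;") "\n" "<br>"
    if color ≠ "" then
      html_parts ++ ["<span style='color:#" ++ PySem.Dict.getD COLOR_NAME_TO_HEX color "000000" ++ "'>" ++ safe ++ "</span>"]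
    else
      html_parts ++ [safe]) []
  PySem.Str.join "" html_parts

-- ===== PORT B =====
def ESCAPE : PySem.Dict Char String :=
  PySem.Dict.ofList [('&', "&amp;"), ('<', "&lt;"), ('>', "&gt;"), (' ', "&nbsp;"), ('\n', "<br>")]

def pvRender (txt color : String) : String :=
  let safe := PySem.Str.join "" ((if txt = "" then "" else txt).toList.map
    (fun c => PySem.Dict.getD ESCAPE c (String.ofList [c])))
  if color ≠ "" then
    "<span style='color:#" ++ PySem.Dict.getD COLOR_NAME_TO_HEX color "000000" ++ "'>" ++ safe ++ "</span>"
  else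
    safe

def segments_to_html_alt (segments : List (String × String)) : String :=
  PySem.Str.join "" (segments.map (fun p => pvRender p.1 p.2))

-- ===== PRECONDITION & SPEC =====
def Spec_segments_to_html (segments : List (String × String)) (out : String) : Prop := out = segments_to_html_alt segments
instance (segments : List (String × String)) (out : String) : Decidable (Spec_segments_to_html segments out) := by unfold Spec_segments_to_html; infer_instance

-- ===== CLAIM (what is proved, stated in full; the proofs are below) =====
def Claim_equal_segments_to_html : Prop := ∀ (segments : List (String × String)), Dom_segments_to_html segments → Spec_segments_to_html segments (segments_to_html segments)

-- ===== LEMMAS AND PROOFS =====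

/-- single-char-pattern replace is a flatMap -/
lemma go_single (a : Char) (new : List Char) :
    ∀ (l : List Char) (fuel : Nat) (acc : List Char), l.length ≤ fuel →
    PySem.Chars.replace.go [a] new fuel l acc
      = acc.reverse ++ l.flatMap (fun c => if c = a then new else [c]) := by
  intro l
  induction l with
  | nil =>
    intro fuel acc _
    cases fuel <;> simp [PySem.Chars.replace.go]
  | cons c t ih =>
    intro fuel acc hf
    cases fuel with
    | zero => simp at hf
    | succ fuel =>
      by_cases hc : c = a
      · subst hc
        simp only [PySem.Chars.replace.go, List.isPrefixOf, BEq.rfl, Bool.and_self, if_true,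
          List.length_cons, List.length_nil, List.drop_succ_cons, List.drop_zero]
        rw [ih fuel (new.reverse ++ acc) (by simpa using Nat.le_of_succ_le_succ hf)]
        simp
      · have : List.isPrefixOf [a] (c :: t) = false := by
          simp [List.isPrefixOf]
          intro h; exact absurd h.symm hc
        simp only [PySem.Chars.replace.go, this, Bool.false_eq_true, if_false]
        rw [ih fuel (c :: acc) (by simpa using Nat.le_of_succ_le_succ hf)]
        simp [hc]

lemma replace_single (s : List Char) (a : Char) (new : List Char) :
    PySem.Chars.replace s [a] new = s.flatMap (fun c => if c = a then new else [c]) := by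
  simp only [PySem.Chars.replace, List.isEmpty_cons, Bool.false_eq_true, if_false]
  simpa using go_single a new s s.length [] le_rfl

/-- B's per-character escape, on lists of chars -/
def escL (c : Char) : List Char :=
  if c = '&' then "&amp;".toList else if c = '<' then "&lt;".toList
  else if c = '>' then "&gt;".toList else if c = ' ' then "&nbsp;".toList
  else if c = '\n' then "<br>".toList else [c]

lemma escB_eq (c : Char) : (PySem.Dict.getD ESCAPE c (String.ofList [c])).toList = escL c := by
  by_cases h1 : c = '&'; · subst h1; decide
  by_cases h2 : c = '<'; · subst h2; decide
  by_cases h3 : c = '>'; · subst h3; decide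
  by_cases h4 : c = ' '; · subst h4; decide
  by_cases h5 : c = '\n'; · subst h5; decide
  have g1 : (('&' : Char) == c) = false := by simp [Ne.symm h1]
  have g2 : (('<' : Char) == c) = false := by simp [Ne.symm h2]
  have g3 : (('>' : Char) == c) = false := by simp [Ne.symm h3]
  have g4 : ((' ' : Char) == c) = false := by simp [Ne.symm h4]
  have g5 : (('\n' : Char) == c) = false := by simp [Ne.symm h5]
  rw [PySem.Dict.getD, PySem.Dict.get?, show ESCAPE.items = [('&', "&amp;"), ('<', "&lt;"),
    ('>', "&gt;"), (' ', "&nbsp;"), ('\n', "<br>")] from by decide]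
  simp [List.find?, g1, g2, g3, g4, g5, escL, h1, h2, h3, h4, h5]

/-- the chained five replaces equal the single-pass escape -/
lemma chain_eq (s : List Char) :
    PySem.Chars.replace (PySem.Chars.replace (PySem.Chars.replace (PySem.Chars.replace
      (PySem.Chars.replace s "&".toList "&amp;".toList) "<".toList "&lt;".toList)
      ">".toList "&gt;".toList) " ".toList "&nbsp;".toList) "\n".toList "<br>".toList
    = s.flatMap escL := by
  have h1 : "&".toList = ['&'] := rfl
  have h2 : "<".toList = ['<'] := rfl
  have h3 : ">".toList = ['>'] := rfl
  have h4 : " ".toList = [' '] := rfl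
  have h5 : "\n".toList = ['\n'] := rfl
  rw [h1, h2, h3, h4, h5, replace_single, replace_single, replace_single, replace_single,
    replace_single]
  simp only [List.flatMap_assoc]
  apply List.flatMap_congr
  intro c _
  by_cases e1 : c = '&'; · subst e1; decide
  by_cases e2 : c = '<'; · subst e2; decide
  by_cases e3 : c = '>'; · subst e3; decide
  by_cases e4 : c = ' '; · subst e4; decide
  by_cases e5 : c = '\n'; · subst e5; decide
  simp [escL, e1, e2, e3, e4, e5]

lemma join_empty_flatMap (f : Char → List Char) (l : List Char) :
    PySem.Chars.join [] (l.map f) = l.flatMap f := by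
  induction l with
  | nil => simp [PySem.Chars.join_nil]
  | cons c cs ih =>
    cases cs with
    | nil => simp [PySem.Chars.join_singleton]
    | cons d ds =>
      simp only [List.map_cons] at ih ⊢
      rw [PySem.Chars.join_cons_cons, ih]
      simp

lemma safe_eq (txt : String) :
    PySem.Str.replace (PySem.Str.replace (PySem.Str.replace (PySem.Str.replace
      (PySem.Str.replace (if txt = "" then "" else txt) "&" "&amp;") "<" "&lt;") ">" "&gt;")
      " " "&nbsp;") "\n" "<br>"
    = PySem.Str.join "" ((if txt = "" then "" else txt).toList.map
        (fun c => PySem.Dict.getD ESCAPE c (String.ofList [c]))) := by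
  set t := (if txt = "" then "" else txt) with ht
  simp only [PySem.Str.replace, PySem.Str.join, String.toList_ofList]
  rw [chain_eq]
  congr 1
  simp only [List.map_map]
  rw [show (String.toList ∘ fun c => PySem.Dict.getD ESCAPE c (String.ofList [c]))
        = escL from funext fun c => escB_eq c]
  rw [show ("" : String).toList = [] from rfl]
  exact (join_empty_flatMap escL t.toList).symm

/-- the per-segment outputs are equal -/
lemma part_eq (txt color : String) :
    (if color ≠ "" then
      "<span style='color:#" ++ PySem.Dict.getD COLOR_NAME_TO_HEX color "000000" ++ "'>" ++
        (PySem.Str.replace (PySem.Str.replace (PySem.Str.replace (PySem.Str.replace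
          (PySem.Str.replace (if txt = "" then "" else txt) "&" "&amp;") "<" "&lt;") ">" "&gt;")
          " " "&nbsp;") "\n" "<br>") ++ "</span>"
     else
      PySem.Str.replace (PySem.Str.replace (PySem.Str.replace (PySem.Str.replace
        (PySem.Str.replace (if txt = "" then "" else txt) "&" "&amp;") "<" "&lt;") ">" "&gt;")
        " " "&nbsp;") "\n" "<br>")
    = pvRender txt color := by
  rw [pvRender, safe_eq]

lemma foldl_eq_map (segments : List (String × String)) (acc : List String) :
    (segments.foldl (fun html_parts p =>
      let txt := p.1
      let color := p.2
      let safe := PySem.Str.replace (PySem.Str.replace (PySem.Str.replace (PySem.Str.replace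
        (PySem.Str.replace (if txt = "" then "" else txt) "&" "&amp;") "<" "&lt;") ">" "&gt;")
        " " "&nbsp;") "\n" "<br>"
      if color ≠ "" then
        html_parts ++ ["<span style='color:#" ++ PySem.Dict.getD COLOR_NAME_TO_HEX color "000000" ++ "'>" ++ safe ++ "</span>"]
      else
        html_parts ++ [safe]) acc)
    = acc ++ segments.map (fun p => pvRender p.1 p.2) := by
  induction segments generalizing acc with
  | nil => simp
  | cons p t ih =>
    simp only [List.foldl_cons, List.map_cons]
    rw [ih]
    by_cases hc : p.2 ≠ ""
    · simp only [← part_eq p.1 p.2, if_pos hc, List.append_assoc, List.singleton_append]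
    · simp only [← part_eq p.1 p.2, if_neg hc, List.append_assoc, List.singleton_append]

-- ===== VERDICT (by name: the statement is the Claim_ definition above) =====
theorem segments_to_html_spec : Claim_equal_segments_to_html := by
  intro segments _
  unfold Spec_segments_to_html segments_to_html segments_to_html_alt
  rw [foldl_eq_map segments []]
  simp
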